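-- pv_equiv track=rewrite | github.com/DhKDc/cse111 | can_sizes_Test.py | compute_best_cost_efficiency
-- ===== SOURCE A (Python) =====
-- def compute_best_cost_efficiency(cost_efficiency):
--     best_cost_efficiency = 1000000000
--     n = len(cost_efficiency)
--     for i in cost_efficiency:
--         if i < best_cost_efficiency:
--             best_cost_efficiency = i
--     for i in range(n):
--         if best_cost_efficiency == cost_efficiency[i]:
--             position = i
--     return position, best_cost_efficiency
-- ===== SOURCE B (Python) =====
-- def compute_best_cost_efficiency(cost_efficiency):
--     # Single right-to-left pass: the first strictly-smaller hit seen from the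
--     # right is automatically the LAST occurrence of the minimum, so no second
--     # scan and no equality branch are needed.
--     position = None
--     best = None
--     for i in range(len(cost_efficiency) - 1, -1, -1):
--         if best is None or cost_efficiency[i] < best:
--             best = cost_efficiency[i]
--             position = i
--     return position, best
-- ===== Notes on version B (the rewrite author's own statement) =====
-- stated objective: alternative
-- what changed: Replaces A's two left-to-right scans (sentinel-initialized min loop, then a full index scan keeping the last equal index) with one right-to-left pass using only a strict comparison, whose first update from the right is by construction the last occurrence of the minimum.
import Mathlib
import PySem

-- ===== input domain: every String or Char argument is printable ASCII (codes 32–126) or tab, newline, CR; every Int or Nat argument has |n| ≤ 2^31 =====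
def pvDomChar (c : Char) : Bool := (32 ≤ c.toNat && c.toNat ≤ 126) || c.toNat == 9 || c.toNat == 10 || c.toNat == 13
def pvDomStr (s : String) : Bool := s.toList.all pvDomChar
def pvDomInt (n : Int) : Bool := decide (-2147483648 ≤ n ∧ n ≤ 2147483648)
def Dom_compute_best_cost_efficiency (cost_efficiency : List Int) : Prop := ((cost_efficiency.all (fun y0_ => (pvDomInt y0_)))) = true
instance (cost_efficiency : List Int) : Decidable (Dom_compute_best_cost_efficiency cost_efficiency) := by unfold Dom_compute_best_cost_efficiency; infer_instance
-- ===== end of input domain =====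

-- B replaces A's two left-to-right scans (sentinel min loop, then a last-match index scan)
-- with ONE right-to-left pass using a strict comparison (objective: alternative; equal cost).

-- ===== PORT A =====
def compute_best_cost_efficiency (cost_efficiency : List Int) : Int × Int :=
  -- best_cost_efficiency = 1000000000; for i in cost_efficiency: if i < best: best = i
  let best := cost_efficiency.foldl (fun b i => if i < b then i else b) 1000000000
  let n := cost_efficiency.length
  -- for i in range(n): if best == cost_efficiency[i]: position = i
  -- 'position' is unbound until the first match: modelled as Option, none = UnboundLocalError
  -- (Pre_ guarantees a match exists, so .getD 0 is never reached on admitted inputs)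
  let pos : Option Int := (PySem.List.pyRange 0 (n : Int) 1).foldl
      (fun p i => if best = PySem.List.pyGetD cost_efficiency i 0 then some i else p) none
  (pos.getD 0, best)

-- ===== PORT B =====
-- loop body of Source B: 'if best is None or cost_efficiency[i] < best: best = …; position = i'
def pvStepB (xs : List Int) (pb : Option Int × Option Int) (i : Int) : Option Int × Option Int :=
  match pb.2 with
  | none => (some i, some (PySem.List.pyGetD xs i 0))
  | some b => if PySem.List.pyGetD xs i 0 < b then (some i, some (PySem.List.pyGetD xs i 0)) else pb

def compute_best_cost_efficiency_alt (cost_efficiency : List Int) : Int × Int :=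
  -- position = None; best = None; for i in range(len(xs)-1, -1, -1): …
  -- the final (position, best) are both assigned on every admitted input (Pre_), so .getD 0
  -- models Python's None only outside Pre_
  let st := (PySem.List.pyRange ((cost_efficiency.length : Int) - 1) (-1) (-1)).foldl
      (pvStepB cost_efficiency) (none, none)
  (st.1.getD 0, st.2.getD 0)

-- ===== PRECONDITION & SPEC =====
-- Pre_ admits exactly the inputs where A returns: some element is ≤ A's sentinel 1000000000
-- (otherwise 'position' stays unbound and A raises UnboundLocalError).
def Pre_compute_best_cost_efficiency (cost_efficiency : List Int) : Prop :=
  ∃ x ∈ cost_efficiency, x ≤ 1000000000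
instance (cost_efficiency : List Int) : Decidable (Pre_compute_best_cost_efficiency cost_efficiency) := by unfold Pre_compute_best_cost_efficiency; infer_instance
def pvWitness_compute_best_cost_efficiency : List Int := [5, 3, 7, 3]

def Spec_compute_best_cost_efficiency (cost_efficiency : List Int) (out : Int × Int) : Prop := out = compute_best_cost_efficiency_alt cost_efficiency
instance (cost_efficiency : List Int) (out : Int × Int) : Decidable (Spec_compute_best_cost_efficiency cost_efficiency out) := by unfold Spec_compute_best_cost_efficiency; infer_instance

-- ===== CLAIM (what is proved, stated in full; the proofs are below) =====
def Claim_equal_compute_best_cost_efficiency : Prop := ∀ (cost_efficiency : List Int), Dom_compute_best_cost_efficiency cost_efficiency → Pre_compute_best_cost_efficiency cost_efficiency → Spec_compute_best_cost_efficiency cost_efficiency (compute_best_cost_efficiency cost_efficiency)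

-- ===== LEMMAS AND PROOFS =====

-- A's first loop is a running min starting from the sentinel.
theorem fold_if_eq_fold_min (xs : List Int) (c : Int) :
    xs.foldl (fun b i => if i < b then i else b) c = xs.foldl min c := by
  induction xs generalizing c with
  | nil => rfl
  | cons x t ih =>
      simp only [List.foldl_cons, ih]
      congr 1
      rw [min_def]
      split_ifs <;> omega

theorem foldl_min_cons_out (t : List Int) (c x : Int) :
    t.foldl min (min c x) = min c (t.foldl min x) := by
  induction t generalizing x with
  | nil => simp
  | cons y t ih =>
      simp only [List.foldl_cons]
      rw [min_assoc, ih]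

-- Fold from the sentinel agrees with min? when some element is ≤ the sentinel.
theorem fold_min_eq_min? (xs : List Int)
    (h : ∃ x ∈ xs, x ≤ 1000000000) :
    xs.foldl min 1000000000 = (PySem.List.min? xs (fun y => y)).getD 0 := by
  cases xs with
  | nil => simp at h
  | cons x t =>
      rw [PySem.List.min?_id_cons]
      simp only [Option.getD_some, List.foldl_cons]
      rw [foldl_min_cons_out]
      have hm : t.foldl min x ≤ 1000000000 := by
        have hmem := PySem.List.min?_isMin (xs := x :: t) (key := fun y => y)
          (m := t.foldl min x) (by rw [PySem.List.min?_id_cons])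
        obtain ⟨y, hy, hyle⟩ := h
        exact le_trans (hmem y hy) hyle
      omega

-- A's second loop finds the LAST index of best, as len-1 minus its reverse index.
theorem last_idx_eq (xs : List Int) (best : Int) (hmem : best ∈ xs) :
    (PySem.List.pyRange 0 (xs.length : Int) 1).foldl
      (fun p i => if best = PySem.List.pyGetD xs i 0 then some i else p) none
    = some ((xs.length : Int) - 1 - (((PySem.List.index? xs.reverse best).getD 0 : Nat) : Int)) := by
  induction xs using List.reverseRecOn with
  | nil => simp at hmem
  | append_singleton xs a ih =>
      have hrange : PySem.List.pyRange 0 ((xs.length : Int) + 1) 1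
          = PySem.List.pyRange 0 (xs.length : Int) 1 ++ [(xs.length : Int)] := by
        exact PySem.List.pyRange_one_succ_right (by positivity)
      have hlen : ((xs ++ [a]).length : Int) = (xs.length : Int) + 1 := by simp
      rw [hlen, hrange, List.foldl_append]
      simp only [List.foldl_cons, List.foldl_nil]
      have hget : PySem.List.pyGetD (xs ++ [a]) (xs.length : Int) 0 = a := by
        rw [PySem.List.pyGetD_eq_getElem _ _ (by positivity) (by simp)]
        simp
      by_cases hba : best = a
      · subst hba
        simp only [hget]
        rw [if_pos trivial]
        have hthis : (PySem.List.index? (xs ++ [best]).reverse best) = some 0 := by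
          simp only [List.reverse_append, List.reverse_singleton, List.singleton_append]
          exact PySem.List.index?_cons_self best xs.reverse
        rw [hthis]
        norm_num
      · have hmem' : best ∈ xs := by
          rcases List.mem_append.mp hmem with h | h
          · exact h
          · simp at h; exact absurd h hba
        rw [hget, if_neg hba]
        have hcong : (PySem.List.pyRange 0 (xs.length : Int) 1).foldl
            (fun p i => if best = PySem.List.pyGetD (xs ++ [a]) i 0 then some i else p) none
          = (PySem.List.pyRange 0 (xs.length : Int) 1).foldl
            (fun p i => if best = PySem.List.pyGetD xs i 0 then some i else p) none := by
          apply PySem.List.foldl_congr_mem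
          intro p i hi
          have hr := (PySem.List.mem_pyRange_one).mp hi
          have h0 : 0 ≤ i := hr.1
          have hlt : i < (xs.length : Int) := hr.2
          have : PySem.List.pyGetD (xs ++ [a]) i 0 = PySem.List.pyGetD xs i 0 := by
            rw [PySem.List.pyGetD_eq_getElem _ _ h0 (by simp; omega),
                PySem.List.pyGetD_eq_getElem _ _ h0 (by omega)]
            exact List.getElem_append_left (by omega)
          rw [this]
        rw [hcong, ih hmem']
        have hidx : PySem.List.index? (xs ++ [a]).reverse best
            = (PySem.List.index? xs.reverse best).map (· + 1) := by
          rw [List.reverse_append]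
          simp only [List.reverse_singleton, List.singleton_append]
          exact PySem.List.index?_cons_of_ne xs.reverse (fun h => hba (Eq.symm h))
        rcases (PySem.List.index?_isSome_iff (xs := xs.reverse) (v := best)).mpr
            (by simpa using hmem') |> Option.isSome_iff_exists.mp with ⟨r, hr⟩
        rw [hidx, hr]
        simp
        omega

-- The countdown range of x::t is the shifted countdown range of t, then index 0.
theorem range_cons_decomp (T : Nat) :
    PySem.List.pyRange (T : Int) (-1) (-1)
    = ((PySem.List.pyRange ((T : Int) - 1) (-1) (-1)).map (fun i => i + 1)) ++ [(0 : Int)] := by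
  rw [PySem.List.pyRange_neg_one, PySem.List.pyRange_neg_one]
  have h1 : ((T : Int) - (-1)).toNat = T + 1 := by omega
  have h2 : ((T : Int) - 1 - (-1)).toNat = T := by omega
  rw [h1, h2, List.range_succ, List.map_append, List.map_map]
  congr 1
  · apply List.map_congr_left
    intro k _
    simp only [Function.comp_apply]
    ring
  · simp

-- Folding B's step over a shifted index list on x::t = shifting the fold over t.
theorem foldl_shift (x : Int) (t : List Int) (l : List Int)
    (hl : ∀ i ∈ l, 0 ≤ i ∧ i < (t.length : Int)) (s : Option Int × Option Int) :
    (l.map (fun i => i + 1)).foldl (pvStepB (x :: t)) (s.1.map (fun p => p + 1), s.2)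
    = ((l.foldl (pvStepB t) s).1.map (fun p => p + 1), (l.foldl (pvStepB t) s).2) := by
  induction l generalizing s with
  | nil => rfl
  | cons i l ih =>
      obtain ⟨h0, hlt⟩ := hl i (List.mem_cons_self ..)
      have hget : PySem.List.pyGetD (x :: t) (i + 1) 0 = PySem.List.pyGetD t i 0 := by
        rw [PySem.List.pyGetD_eq_getElem _ _ (by omega) (by simp; omega),
            PySem.List.pyGetD_eq_getElem _ _ h0 (by omega)]
        have : (i + 1).toNat = i.toNat + 1 := by omega
        simp [this]
      have hstep : pvStepB (x :: t) (s.1.map (fun p => p + 1), s.2) (i + 1)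
          = ((pvStepB t s i).1.map (fun p => p + 1), (pvStepB t s i).2) := by
        unfold pvStepB
        cases hs : s.2 with
        | none => simp [hget]
        | some b =>
            simp only [hget]
            split_ifs <;> simp [hs]
      simp only [List.map_cons, List.foldl_cons, hstep]
      exact ih (fun j hj => hl j (List.mem_cons_of_mem _ hj)) _

theorem best_cons (x : Int) (t : List Int) (hne : t ≠ []) :
    (PySem.List.min? (x :: t) (fun y => y)).getD 0
    = min x ((PySem.List.min? t (fun y => y)).getD 0) := by
  cases t with
  | nil => exact absurd rfl hne
  | cons y t' =>
      rw [PySem.List.min?_id_cons, PySem.List.min?_id_cons]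
      simp only [Option.getD_some, List.foldl_cons]
      exact foldl_min_cons_out t' x y

-- Characterization of B's single right-to-left pass: it computes the minimum and
-- the last index attaining it (stated through the reverse index, as in last_idx_eq).
theorem altFold_char (xs : List Int) (hne : xs ≠ []) :
    (PySem.List.pyRange ((xs.length : Int) - 1) (-1) (-1)).foldl (pvStepB xs) (none, none)
    = (some ((xs.length : Int) - 1 -
        (((PySem.List.index? xs.reverse ((PySem.List.min? xs (fun y => y)).getD 0)).getD 0 : Nat) : Int)),
       some ((PySem.List.min? xs (fun y => y)).getD 0)) := by
  induction xs with
  | nil => exact absurd rfl hne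
  | cons x t ih =>
      have hlen : ((x :: t).length : Int) - 1 = (t.length : Int) := by simp
      rw [hlen, range_cons_decomp t.length, List.foldl_append]
      have hshift := foldl_shift x t (PySem.List.pyRange ((t.length : Int) - 1) (-1) (-1))
        (fun i hi => by
          have := (PySem.List.mem_pyRange_neg_one).mp hi
          constructor <;> omega) (none, none)
      simp only [Option.map_none] at hshift
      rw [hshift]
      have hget0 : PySem.List.pyGetD (x :: t) 0 0 = x := by
        rw [PySem.List.pyGetD_eq_getElem _ _ (by omega) (by simp)]
        simp
      by_cases htne : t = []
      · subst htne
        simp only [List.length_nil, Nat.cast_zero]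
        rw [PySem.List.pyRange_neg_one_eq_nil (by omega)]
        simp only [List.foldl_nil, List.foldl_cons]
        show pvStepB [x] (none, none) 0 = _
        unfold pvStepB
        simp only [hget0]
        rw [PySem.List.min?_id_cons]
        simp
      · rw [ih htne]
        simp only [List.foldl_cons, List.foldl_nil, Option.map_some]
        set m := (PySem.List.min? t (fun y => y)).getD 0 with hm
        have hmsome : PySem.List.min? t (fun y => y) = some m := by
          cases hmin : PySem.List.min? t (fun y => y) with
          | none => exact absurd ((PySem.List.min?_eq_none_iff t _).mp hmin) htne
          | some v => simp [hm, hmin]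
        have hmmem : m ∈ t := PySem.List.min?_mem hmsome
        have hmin : ∀ y ∈ t, m ≤ y := PySem.List.min?_isMin hmsome
        show pvStepB (x :: t) _ 0 = _
        unfold pvStepB
        simp only [hget0]
        by_cases hxm : x < m
        · rw [if_pos hxm]
          have hbest : (PySem.List.min? (x :: t) (fun y => y)).getD 0 = x := by
            rw [best_cons x t htne, ← hm]; omega
          have hxnot : x ∉ t.reverse := by
            simp only [List.mem_reverse]
            intro hx
            have := hmin x hx
            omega
          rw [hbest, List.reverse_cons,
              PySem.List.index?_append_singleton_self t.reverse x hxnot]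
          simp
        · rw [if_neg hxm]
          have hbest : (PySem.List.min? (x :: t) (fun y => y)).getD 0 = m := by
            rw [best_cons x t htne, ← hm]; omega
          rw [hbest, List.reverse_cons, PySem.List.index?_append_of_mem _ (by simpa using hmmem)]
          rcases Option.isSome_iff_exists.mp
              ((PySem.List.index?_isSome_iff (xs := t.reverse) (v := m)).mpr (by simpa using hmmem))
            with ⟨r, hr⟩
          rw [hr]
          simp only [Option.getD_some]
          have harith : ((t.length : Int) - 1 - (r : Int) + 1) = (t.length : Int) - (r : Int) := by
            omega
          rw [harith]

-- ===== VERDICT (by name: the statement is the Claim_ definition above) =====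
theorem compute_best_cost_efficiency_spec : Claim_equal_compute_best_cost_efficiency := by
  intro xs _hdom hpre
  unfold Spec_compute_best_cost_efficiency
  simp only [compute_best_cost_efficiency, compute_best_cost_efficiency_alt]
  have hne : xs ≠ [] := by
    rintro rfl
    obtain ⟨x, hx, -⟩ := hpre
    simp at hx
  have hbest : xs.foldl (fun b i => if i < b then i else b) 1000000000
      = (PySem.List.min? xs (fun y => y)).getD 0 := by
    rw [fold_if_eq_fold_min]; exact fold_min_eq_min? xs hpre
  have hmem : (PySem.List.min? xs (fun y => y)).getD 0 ∈ xs := by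
    cases hm : PySem.List.min? xs (fun y => y) with
    | none => exact absurd ((PySem.List.min?_eq_none_iff xs (fun y => y)).mp hm) hne
    | some m => simpa using PySem.List.min?_mem hm
  rw [hbest, last_idx_eq xs _ hmem, altFold_char xs hne]
  rfl
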